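-- pv_equiv track=rewrite | github.com/rvanraamsdonk/r2r_financial_close_blackline_light | src/r2r/agents/reporting.py | generate_forensic_recommendations
-- ===== SOURCE A (Python) =====
-- from typing import Dict, List, Any, Optional
--
-- def generate_forensic_recommendations(forensic_findings: List) -> List[str]:
--     """Generate forensic-specific recommendations."""
--     recommendations = []
--
--     # Group by root cause
--     root_causes = {}
--     for finding in forensic_findings:
--         cause = finding.get("root_cause", "unknown")
--         if cause not in root_causes:
--             root_causes[cause] = []
--         root_causes[cause].append(finding)
--
--     # Generate recommendations by root cause
--     for cause, findings in root_causes.items():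
--         if len(findings) > 1:
--             recommendations.append(f"Address systemic {cause.replace('_', ' ')} issues affecting {len(findings)} transactions")
--         else:
--             recommendations.append(findings[0].get("recommended_action", "Investigate further"))
--
--     return recommendations
-- ===== SOURCE B (Python) =====
-- def generate_forensic_recommendations(forensic_findings):
--     """Generate forensic-specific recommendations."""
--     # One-pass count of root causes, then a single emitting scan with a 'seen' set.
--     counts = {}
--     for finding in forensic_findings:
--         cause = finding.get("root_cause", "unknown")
--         counts[cause] = counts.get(cause, 0) + 1
--
--     recommendations = []
--     seen = set()
--     for finding in forensic_findings:
--         cause = finding.get("root_cause", "unknown")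
--         if cause in seen:
--             continue
--         seen.add(cause)
--         n = counts[cause]
--         if n > 1:
--             recommendations.append(f"Address systemic {cause.replace('_', ' ')} issues affecting {n} transactions")
--         else:
--             recommendations.append(finding.get("recommended_action", "Investigate further"))
--     return recommendations
-- ===== Notes on version B (the rewrite author's own statement) =====
-- stated objective: alternative
-- what changed: Replaces 'group findings into per-cause lists, then iterate the groups' with 'count causes in one pass, then emit during a single forward scan over the raw findings with a seen-set', keeping first-appearance order without building any group lists.
import Mathlib
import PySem

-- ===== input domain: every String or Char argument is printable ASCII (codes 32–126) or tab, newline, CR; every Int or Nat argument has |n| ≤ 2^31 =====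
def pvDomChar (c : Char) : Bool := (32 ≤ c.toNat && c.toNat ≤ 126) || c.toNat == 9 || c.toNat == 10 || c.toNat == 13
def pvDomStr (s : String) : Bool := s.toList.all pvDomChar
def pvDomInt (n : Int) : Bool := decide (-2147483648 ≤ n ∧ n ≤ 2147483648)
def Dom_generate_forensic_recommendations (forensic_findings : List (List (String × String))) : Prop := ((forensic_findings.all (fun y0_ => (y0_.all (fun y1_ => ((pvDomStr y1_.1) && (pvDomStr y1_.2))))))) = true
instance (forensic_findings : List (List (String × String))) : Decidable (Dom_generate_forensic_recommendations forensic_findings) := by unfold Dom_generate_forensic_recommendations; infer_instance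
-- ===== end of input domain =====

-- B replaces A's group-into-lists-then-iterate-groups with count-first-then-emit in one
-- forward scan over the raw findings (same output, same order); objective: alternative decomposition.

-- shared transliterations of the Python expressions both sources contain
def pvCause (f : List (String × String)) : String :=
  (PySem.Dict.mk f).getD "root_cause" "unknown"

def pvAction (f : List (String × String)) : String :=
  (PySem.Dict.mk f).getD "recommended_action" "Investigate further"

def pvMsg (c : String) (n : Int) : String :=
  "Address systemic " ++ PySem.Str.replace c "_" " " ++ " issues affecting " ++ PySem.Int.toStr n ++ " transactions"

-- ===== PORT A =====
def generate_forensic_recommendations (forensic_findings : List (List (String × String))) : List String :=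
  -- group by root cause ('if cause not in root_causes: … = []' then append)
  let root_causes : PySem.Dict String (List (List (String × String))) :=
    forensic_findings.foldl (fun d f =>
      let c := pvCause f
      let d := if d.contains c then d else d.insert c []
      d.modify c [] (· ++ [f])) PySem.Dict.empty
  -- then one recommendation per dict item ('findings[0]' never fails: groups are nonempty, so pyGetD is exact)
  root_causes.items.foldl (fun recs p =>
    recs ++ [if p.2.length > 1 then pvMsg p.1 (p.2.length : Int)
             else pvAction (PySem.List.pyGetD p.2 0 [])]) []

-- ===== PORT B =====
def generate_forensic_recommendations_alt (forensic_findings : List (List (String × String))) : List String :=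
  -- pass 1: count root causes  (counts[c] = counts.get(c, 0) + 1)
  let counts : PySem.Dict String Int :=
    forensic_findings.foldl (fun d f =>
      let c := pvCause f
      d.insert c (d.getD c 0 + 1)) PySem.Dict.empty
  -- pass 2: emit at each cause's first appearance ('counts[cause]' never fails: cause was counted, so getD is exact)
  let st := forensic_findings.foldl (fun (st : PySem.Set String × List String) f =>
    let c := pvCause f
    if PySem.Set.contains st.1 c then st
    else (PySem.Set.add st.1 c,
      st.2 ++ [if counts.getD c 0 > 1 then pvMsg c (counts.getD c 0)
               else pvAction f])) (PySem.Set.empty, [])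
  st.2

-- ===== PRECONDITION & SPEC =====
def Spec_generate_forensic_recommendations (forensic_findings : List (List (String × String))) (out : List String) : Prop := out = generate_forensic_recommendations_alt forensic_findings
instance (forensic_findings : List (List (String × String))) (out : List String) : Decidable (Spec_generate_forensic_recommendations forensic_findings out) := by unfold Spec_generate_forensic_recommendations; infer_instance

-- ===== CLAIM (what is proved, stated in full; the proofs are below) =====
def Claim_equal_generate_forensic_recommendations : Prop := ∀ (forensic_findings : List (List (String × String))), Dom_generate_forensic_recommendations forensic_findings → Spec_generate_forensic_recommendations forensic_findings (generate_forensic_recommendations forensic_findings)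

-- ===== LEMMAS AND PROOFS =====

-- the recommendation both programs produce for a cause c of fs
def pvRec (fs : List (List (String × String))) (c : String) : String :=
  if (fs.map pvCause).count c > 1 then pvMsg c ((fs.map pvCause).count c : Int)
  else pvAction ((fs.find? (fun f => pvCause f == c)).getD [])

-- A's 'if cause not in d: d[cause] = []; d[cause].append(f)' is one modify
theorem pvStepA (d : PySem.Dict String (List (List (String × String)))) (f : List (String × String)) :
    (let c := pvCause f
     let d' := if d.contains c then d else d.insert c []
     d'.modify c [] (· ++ [f])) = d.modify (pvCause f) [] (· ++ [f]) := by
  by_cases h : d.contains (pvCause f) = true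
  · simp [h]
  · simp only [Bool.not_eq_true] at h
    simp [h, PySem.Dict.modify, PySem.Dict.insert_insert_self, PySem.Dict.getD_insert_self,
      PySem.Dict.getD_of_not_contains d _ h]

-- first element of a filtered list is the first match
theorem pvHeadFilter {α : Type} (l : List α) (p : α → Bool) (d : α) :
    PySem.List.pyGetD (l.filter p) 0 d = ((l.find? p).getD d) := by
  induction l with
  | nil => rfl
  | cons x xs ih =>
    by_cases h : p x = true
    · simp [h, List.find?_cons_of_pos h, PySem.List.pyGetD, PySem.List.pyGet?,
        PySem.List.pyIdx?]
    · simp only [Bool.not_eq_true] at h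
      simp [h, ih]

theorem pvA_eq (fs : List (List (String × String))) :
    generate_forensic_recommendations fs = (PySem.Set.ofList (fs.map pvCause)).map (pvRec fs) := by
  unfold generate_forensic_recommendations
  have hfun : (fun (d : PySem.Dict String (List (List (String × String)))) f =>
      (let c := pvCause f
       let d' := if d.contains c then d else d.insert c []
       d'.modify c [] (· ++ [f]))) = fun d f => d.modify (pvCause f) [] (· ++ [f]) := by
    funext d f; exact pvStepA d f
  simp only [hfun]
  set D := fs.foldl (fun d f => d.modify (pvCause f) [] (· ++ [f])) PySem.Dict.empty with hD
  have hnodup : D.keys.Nodup := by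
    rw [hD]
    exact PySem.Dict.nodup_keys_foldl_modify_key fs pvCause [] (fun d f => (· ++ [f])) _
      PySem.Dict.nodup_keys_empty
  have hkeys : D.keys = PySem.Set.ofList (fs.map pvCause) := by
    rw [hD, PySem.Dict.keys_foldl_modify_key fs pvCause [] (fun d f => (· ++ [f])),
      PySem.Dict.keys_empty, PySem.Set.update_nil_left]
  have hgetD : ∀ c, D.getD c [] = fs.filter (fun f => pvCause f == c) := by
    intro c
    have hmap : D = (fs.map (fun f => (pvCause f, f))).foldl
        (fun d p => d.modify p.1 [] (· ++ [p.2])) PySem.Dict.empty := by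
      rw [hD, List.foldl_map]
    rw [hmap, PySem.Dict.getD_foldl_modify_append, PySem.Dict.getD_empty, List.filter_map]
    simp [Function.comp_def]
  rw [PySem.List.foldl_append_singleton_eq_map
    (fun p => if p.2.length > 1 then pvMsg p.1 (p.2.length : Int)
              else pvAction (PySem.List.pyGetD p.2 0 [])) D.items []]
  rw [PySem.Dict.items_eq_map_keys D hnodup [], List.map_map, hkeys]
  refine List.map_congr_left ?_
  intro c hc
  simp only [Function.comp_def, hgetD c, pvRec]
  have hcount : (fs.map pvCause).count c = (fs.filter (fun f => pvCause f == c)).length := by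
    rw [List.count_eq_countP, List.countP_map, List.countP_eq_length_filter]
    rfl
  rw [pvHeadFilter, hcount]

-- B's emitting scan, from any already-processed prefix of fs
theorem pvB_loop (fs : List (List (String × String))) (counts : PySem.Dict String Int)
    (hcnt : ∀ c, counts.getD c 0 = ((fs.map pvCause).count c : Int)) :
    ∀ (rest pre : List (List (String × String))), fs = pre ++ rest →
    (rest.foldl (fun (st : PySem.Set String × List String) f =>
        let c := pvCause f
        if PySem.Set.contains st.1 c then st
        else (PySem.Set.add st.1 c,
          st.2 ++ [if counts.getD c 0 > 1 then pvMsg c (counts.getD c 0)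
                   else pvAction f]))
      (PySem.Set.ofList (pre.map pvCause), (PySem.Set.ofList (pre.map pvCause)).map (pvRec fs))).2
      = (PySem.Set.ofList (fs.map pvCause)).map (pvRec fs) := by
  intro rest
  induction rest with
  | nil => intro pre hpre; simp [hpre]
  | cons f rest' ih =>
    intro pre hpre
    have hpre' : fs = (pre ++ [f]) ++ rest' := by simp [hpre]
    have hmap' : (pre ++ [f]).map pvCause = pre.map pvCause ++ [pvCause f] := by simp
    by_cases hc : pvCause f ∈ pre.map pvCause
    · have hcontains : PySem.Set.contains (PySem.Set.ofList (pre.map pvCause)) (pvCause f) = true :=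
        (PySem.Set.contains_iff _ _).2 ((PySem.Set.mem_ofList _ _).2 hc)
      have hofl : PySem.Set.ofList ((pre ++ [f]).map pvCause) = PySem.Set.ofList (pre.map pvCause) := by
        rw [hmap', PySem.Set.ofList_append_singleton,
          PySem.Set.add_of_mem ((PySem.Set.mem_ofList _ _).2 hc)]
      have hih := ih (pre ++ [f]) hpre'
      rw [hofl] at hih
      simp only [List.foldl_cons]
      rw [if_pos hcontains]
      exact hih
    · have hcontains : PySem.Set.contains (PySem.Set.ofList (pre.map pvCause)) (pvCause f) = false := by
        rw [← Bool.not_eq_true, PySem.Set.contains_iff, PySem.Set.mem_ofList]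
        exact hc
      have hnotmem : pvCause f ∉ PySem.Set.ofList (pre.map pvCause) := by
        rw [PySem.Set.mem_ofList]; exact hc
      have hofl : PySem.Set.ofList ((pre ++ [f]).map pvCause)
          = PySem.Set.ofList (pre.map pvCause) ++ [pvCause f] := by
        rw [hmap', PySem.Set.ofList_append_singleton, PySem.Set.add_of_not_mem hnotmem]
      have hfind : fs.find? (fun g => pvCause g == pvCause f) = some f := by
        rw [hpre, List.find?_append]
        have h1 : pre.find? (fun g => pvCause g == pvCause f) = none := by
          rw [List.find?_eq_none]
          intro g hg hbeq
          exact hc (by simpa using (List.mem_map.2 ⟨g, hg, (beq_iff_eq.1 hbeq)⟩))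
        rw [h1, List.find?_cons_of_pos (by simp)]
        rfl
      have hrec : (if counts.getD (pvCause f) 0 > 1 then pvMsg (pvCause f) (counts.getD (pvCause f) 0)
          else pvAction f) = pvRec fs (pvCause f) := by
        rw [hcnt (pvCause f), pvRec, hfind]
        by_cases hgt : (fs.map pvCause).count (pvCause f) > 1
        · rw [if_pos (by exact_mod_cast hgt), if_pos hgt]
        · rw [if_neg (by exact_mod_cast hgt), if_neg hgt]
          rfl
      have hih := ih (pre ++ [f]) hpre'
      rw [hofl] at hih
      simp only [List.map_append, List.map_cons, List.map_nil] at hih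
      simp only [List.foldl_cons]
      rw [if_neg (by rw [hcontains]; exact Bool.false_ne_true)]
      rw [PySem.Set.add_of_not_mem hnotmem, hrec]
      exact hih

theorem pvB_eq (fs : List (List (String × String))) :
    generate_forensic_recommendations_alt fs = (PySem.Set.ofList (fs.map pvCause)).map (pvRec fs) := by
  unfold generate_forensic_recommendations_alt
  have hcnt : ∀ c, (fs.foldl (fun d f => d.insert (pvCause f) (d.getD (pvCause f) 0 + 1))
      PySem.Dict.empty).getD c 0 = ((fs.map pvCause).count c : Int) := by
    intro c
    have heq : (fs.map pvCause).foldl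
        (fun (d : PySem.Dict String Int) (x : String) => d.insert x (d.getD x 0 + 1)) PySem.Dict.empty
        = fs.foldl (fun d f => d.insert (pvCause f) (d.getD (pvCause f) 0 + 1)) PySem.Dict.empty :=
      List.foldl_map
    rw [← heq, PySem.Dict.getD_foldl_insert_add_one, PySem.Dict.getD_empty]
    simp
  have := pvB_loop fs _ hcnt fs [] rfl
  simpa using this

-- ===== VERDICT (by name: the statement is the Claim_ definition above) =====
theorem generate_forensic_recommendations_spec : Claim_equal_generate_forensic_recommendations := by
  intro fs _
  unfold Spec_generate_forensic_recommendations
  rw [pvA_eq, pvB_eq]
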